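-- pv_equiv track=rewrite | github.com/bmsuisse/rusket | scripts/gen_api_reference.py | _parse_parameters_section
-- ===== SOURCE A (Python) =====
-- def _parse_parameters_section(text: str) -> list[tuple[str, str, str]]:
--     """Parse a NumPy Parameters / Returns / Raises section.
--
--     Returns a list of (name, type, description) tuples.
--     """
--     if not text:
--         return []
--     rows: list[tuple[str, str, str]] = []
--     current_name = ""
--     current_type = ""
--     current_desc_lines: list[str] = []
--
--     for line in text.splitlines():
--         # A new parameter entry starts with something that is NOT indented and
--         # matches `name : type` or just `name`
--         if line and not line.startswith(" "):
--             if current_name: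
--                 rows.append((current_name, current_type, " ".join(current_desc_lines).strip()))
--             if " : " in line:
--                 current_name, current_type = line.split(" : ", 1)
--             else:
--                 current_name = line.strip()
--                 current_type = ""
--             current_name = current_name.strip()
--             current_type = current_type.strip()
--             current_desc_lines = []
--         else:
--             current_desc_lines.append(line.strip())
--
--     if current_name:
--         rows.append((current_name, current_type, " ".join(current_desc_lines).strip()))
--     return rows
-- ===== SOURCE B (Python) =====
-- def _format_group(group):
--     header, body = group
--     if " : " in header:
--         name, typ = header.split(" : ", 1)
--     else:
--         name, typ = header, ""
--     name, typ = name.strip(), typ.strip()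
--     if not name:
--         return []
--     return [(name, typ, " ".join(body).strip())]
--
--
-- def _parse_parameters_section(text: str) -> list[tuple[str, str, str]]:
--     groups: list[tuple[str, list[str]]] = []
--     for line in text.splitlines():
--         if line and not line.startswith(" "):
--             groups.append((line, []))
--         elif groups:
--             groups[-1][1].append(line.strip())
--     return [row for g in groups for row in _format_group(g)]
-- ===== Notes on version B (the rewrite author's own statement) =====
-- stated objective: alternative
-- what changed: A's single interleaved state machine (current name/type/desc accumulators flushed on each new header and at the end) is replaced by two separate passes: a grouping pass that pairs each unindented header line with its following body lines, then a formatting pass that turns each (header, body) group into its tuple.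
import Mathlib
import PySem

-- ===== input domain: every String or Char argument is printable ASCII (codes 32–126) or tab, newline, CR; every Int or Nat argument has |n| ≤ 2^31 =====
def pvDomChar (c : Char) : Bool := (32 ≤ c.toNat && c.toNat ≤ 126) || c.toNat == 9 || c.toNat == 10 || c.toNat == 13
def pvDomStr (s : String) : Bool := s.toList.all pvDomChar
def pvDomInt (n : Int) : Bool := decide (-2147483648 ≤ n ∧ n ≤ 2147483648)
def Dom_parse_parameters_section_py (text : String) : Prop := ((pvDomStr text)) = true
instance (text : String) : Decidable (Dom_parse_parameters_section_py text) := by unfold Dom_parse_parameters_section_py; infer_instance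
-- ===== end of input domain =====

-- B replaces A's interleaved flush-on-next-header state machine by a grouping pass plus a formatting pass
-- (same result, same O(n) cost; objective: alternative decomposition).

-- ===== PORT A =====
-- A's repeated `rows.append((current_name, current_type, " ".join(...).strip()))` guarded by `if current_name:`
def pvAFlush (st : List (String × String × String) × String × String × List String) :
    List (String × String × String) :=
  if st.2.1 ≠ "" then
    st.1 ++ [(st.2.1, st.2.2.1, PySem.Str.strip (PySem.Str.join " " st.2.2.2))]
  else st.1

-- one iteration of A's `for line in text.splitlines():` loop; state = (rows, current_name, current_type, current_desc_lines)
def pvAStep (st : List (String × String × String) × String × String × List String)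
    (line : String) : List (String × String × String) × String × String × List String :=
  if line ≠ "" ∧ PySem.Str.startswith line " " = false then
    let rows := pvAFlush st
    let nt : String × String :=
      if PySem.Str.isIn " : " line then
        let parts := (PySem.Str.splitMax? line " : " 1).getD []
        (parts.getD 0 "", parts.getD 1 "")
      else (PySem.Str.strip line, "")
    (rows, PySem.Str.strip nt.1, PySem.Str.strip nt.2, ([] : List String))
  else
    (st.1, st.2.1, st.2.2.1, st.2.2.2 ++ [PySem.Str.strip line])

def parse_parameters_section_py (text : String) : List (String × String × String) :=
  if text = "" then []
  else pvAFlush ((PySem.Str.splitlines text).foldl pvAStep ([], "", "", []))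

-- ===== PORT B =====
-- `groups[-1][1].append(s)` guarded by `elif groups:` — append s to the body of the last group, no-op on []
def pvSetLastBody : List (String × List String) → String → List (String × List String)
  | [], _ => []
  | [(h, b)], s => [(h, b ++ [s])]
  | g :: g2 :: gs, s => g :: pvSetLastBody (g2 :: gs) s

-- one iteration of B's grouping loop
def pvGroupStep (gs : List (String × List String)) (line : String) :
    List (String × List String) :=
  if line ≠ "" ∧ PySem.Str.startswith line " " = false then gs ++ [(line, ([] : List String))]
  else pvSetLastBody gs (PySem.Str.strip line)

-- B's _format_group
def pvFormatGroup (g : String × List String) : List (String × String × String) :=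
  let nt : String × String :=
    if PySem.Str.isIn " : " g.1 then
      let parts := (PySem.Str.splitMax? g.1 " : " 1).getD []
      (parts.getD 0 "", parts.getD 1 "")
    else (g.1, "")
  let name := PySem.Str.strip nt.1
  let typ := PySem.Str.strip nt.2
  if name ≠ "" then [(name, typ, PySem.Str.strip (PySem.Str.join " " g.2))] else []

def parse_parameters_section_py_alt (text : String) : List (String × String × String) :=
  ((PySem.Str.splitlines text).foldl pvGroupStep []).flatMap pvFormatGroup

-- ===== PRECONDITION & SPEC =====
def Spec_parse_parameters_section_py (text : String) (out : List (String × String × String)) : Prop := out = parse_parameters_section_py_alt text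
instance (text : String) (out : List (String × String × String)) : Decidable (Spec_parse_parameters_section_py text out) := by unfold Spec_parse_parameters_section_py; infer_instance

-- ===== CLAIM (what is proved, stated in full; the proofs are below) =====
def Claim_equal_parse_parameters_section_py : Prop := ∀ (text : String), Dom_parse_parameters_section_py text → Spec_parse_parameters_section_py text (parse_parameters_section_py text)

-- ===== LEMMAS AND PROOFS =====

-- stripping is idempotent (A strips the no-type header name twice, B once)
lemma pv_chars_strip_strip (l : List Char) :
    PySem.Chars.strip (PySem.Chars.strip l) = PySem.Chars.strip l := by
  have hpre : ∀ (x y : List Char), List.dropWhile PySem.Chars.isspace x = x → y <+: x →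
      List.dropWhile PySem.Chars.isspace y = y := by
    intro x y hx hy
    cases y with
    | nil => rfl
    | cons a t =>
      obtain ⟨r, hr⟩ := hy
      subst hr
      rw [List.cons_append, List.dropWhile_cons] at hx
      rw [List.dropWhile_cons]
      by_cases ha : PySem.Chars.isspace a = true
      · exfalso
        simp only [ha, if_true] at hx
        have hlen := (List.dropWhile_suffix (l := t ++ r) PySem.Chars.isspace).length_le
        rw [hx] at hlen
        simp at hlen
      · simp [ha]
  have hpref : ∀ x : List Char, PySem.Chars.rstrip x <+: x := by
    intro x
    have h1 : List.dropWhile PySem.Chars.isspace x.reverse <:+ x.reverse :=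
      List.dropWhile_suffix _
    have := (List.reverse_suffix (l₁ := (List.dropWhile PySem.Chars.isspace x.reverse).reverse)
      (l₂ := x)).mp (by simpa using h1)
    exact this
  have hl : ∀ x : List Char, List.dropWhile PySem.Chars.isspace (PySem.Chars.lstrip x)
      = PySem.Chars.lstrip x := by
    intro x; exact List.dropWhile_idempotent _ _
  have hlr : PySem.Chars.lstrip (PySem.Chars.rstrip (PySem.Chars.lstrip l))
      = PySem.Chars.rstrip (PySem.Chars.lstrip l) := by
    exact hpre _ _ (hl l) (hpref _)
  have hrr : ∀ x : List Char, PySem.Chars.rstrip (PySem.Chars.rstrip x) = PySem.Chars.rstrip x := by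
    intro x
    simp [PySem.Chars.rstrip, List.dropWhile_idempotent]
  calc PySem.Chars.strip (PySem.Chars.strip l)
      = PySem.Chars.rstrip (PySem.Chars.lstrip (PySem.Chars.rstrip (PySem.Chars.lstrip l))) := rfl
    _ = PySem.Chars.rstrip (PySem.Chars.rstrip (PySem.Chars.lstrip l)) := by rw [hlr]
    _ = PySem.Chars.rstrip (PySem.Chars.lstrip l) := hrr _
    _ = PySem.Chars.strip l := rfl

lemma pv_strip_strip (s : String) :
    PySem.Str.strip (PySem.Str.strip s) = PySem.Str.strip s := by
  simp [PySem.Str.strip, pv_chars_strip_strip]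

-- A's header parse (name, type) before the final strips, as one term
def pvHeadNT (line : String) : String × String :=
  if PySem.Str.isIn " : " line then
    let parts := (PySem.Str.splitMax? line " : " 1).getD []
    (parts.getD 0 "", parts.getD 1 "")
  else (PySem.Str.strip line, "")

-- flushing A's open entry (header h, body b) is exactly formatting B's group (h, b)
lemma pv_flush_eq_fmt (rows : List (String × String × String)) (h : String) (b : List String) :
    pvAFlush (rows, PySem.Str.strip (pvHeadNT h).1, PySem.Str.strip (pvHeadNT h).2, b)
      = rows ++ pvFormatGroup (h, b) := by
  by_cases hi : PySem.Str.isIn " : " h = true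
  · simp only [pvHeadNT, pvFormatGroup, pvAFlush, hi, if_true]
    split_ifs <;> simp_all
  · simp only [pvHeadNT, pvFormatGroup, pvAFlush, hi, Bool.false_eq_true, if_false,
      pv_strip_strip]
    split_ifs <;> simp_all

lemma pv_astep_header (st : List (String × String × String) × String × String × List String)
    (line : String) (hc : line ≠ "" ∧ PySem.Str.startswith line " " = false) :
    pvAStep st line
      = (pvAFlush st, PySem.Str.strip (pvHeadNT line).1, PySem.Str.strip (pvHeadNT line).2,
        ([] : List String)) := by
  simp only [pvAStep, pvHeadNT, if_pos hc]

lemma pv_setLast_append (gs : List (String × List String)) (h : String) (b : List String)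
    (s : String) : pvSetLastBody (gs ++ [(h, b)]) s = gs ++ [(h, b ++ [s])] := by
  induction gs with
  | nil => simp [pvSetLastBody]
  | cons a t ih =>
    cases t with
    | nil => simp [pvSetLastBody]
    | cons c t' => simpa [pvSetLastBody] using ih

lemma pv_foldB_append (lines : List String) :
    ∀ (gs : List (String × List String)) (g : String × List String),
      List.foldl pvGroupStep (gs ++ [g]) lines = gs ++ List.foldl pvGroupStep [g] lines := by
  induction lines with
  | nil => intro gs g; rfl
  | cons line rest ih =>
    intro gs g
    by_cases hc : line ≠ "" ∧ PySem.Str.startswith line " " = false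
    · have h1 : List.foldl pvGroupStep (gs ++ [g]) (line :: rest)
          = List.foldl pvGroupStep ((gs ++ [g]) ++ [(line, ([] : List String))]) rest := by
        rw [List.foldl_cons]; simp only [pvGroupStep]; rw [if_pos hc]
      have h2 : List.foldl pvGroupStep [g] (line :: rest)
          = List.foldl pvGroupStep ([g] ++ [(line, ([] : List String))]) rest := by
        rw [List.foldl_cons]; simp only [pvGroupStep]; rw [if_pos hc]
      rw [h1, h2, ih (gs ++ [g]) (line, []), ih [g] (line, [])]
      simp
    · simp only [List.foldl_cons, pvGroupStep, if_neg hc]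
      obtain ⟨h, b⟩ := g
      rw [pv_setLast_append]
      have : pvSetLastBody [(h, b)] (PySem.Str.strip line) = [(h, b ++ [PySem.Str.strip line])] := by
        simp [pvSetLastBody]
      rw [this]
      exact ih gs (h, b ++ [PySem.Str.strip line])

-- main invariant: A with an open entry parsed from header h (body b so far) vs B with [(h, b)] as last group
lemma pv_open (lines : List String) :
    ∀ (rows : List (String × String × String)) (h : String) (b : List String),
      pvAFlush (lines.foldl pvAStep
          (rows, PySem.Str.strip (pvHeadNT h).1, PySem.Str.strip (pvHeadNT h).2, b))
        = rows ++ (List.foldl pvGroupStep [(h, b)] lines).flatMap pvFormatGroup := by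
  induction lines with
  | nil =>
    intro rows h b
    simpa using pv_flush_eq_fmt rows h b
  | cons line rest ih =>
    intro rows h b
    by_cases hc : line ≠ "" ∧ PySem.Str.startswith line " " = false
    · rw [List.foldl_cons, pv_astep_header _ _ hc,
        ih (pvAFlush (rows, PySem.Str.strip (pvHeadNT h).1, PySem.Str.strip (pvHeadNT h).2, b))
          line [],
        pv_flush_eq_fmt rows h b]
      have hB : List.foldl pvGroupStep [(h, b)] (line :: rest)
          = [(h, b)] ++ List.foldl pvGroupStep [(line, [])] rest := by
        rw [List.foldl_cons]
        have : pvGroupStep [(h, b)] line = [(h, b)] ++ [(line, ([] : List String))] := by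
          simp only [pvGroupStep]; rw [if_pos hc]
        rw [this, pv_foldB_append]
      rw [hB]
      simp
    · rw [List.foldl_cons]
      have hA : pvAStep (rows, PySem.Str.strip (pvHeadNT h).1, PySem.Str.strip (pvHeadNT h).2, b)
            line
          = (rows, PySem.Str.strip (pvHeadNT h).1, PySem.Str.strip (pvHeadNT h).2,
            b ++ [PySem.Str.strip line]) := by
        simp only [pvAStep]; rw [if_neg hc]
      rw [hA, ih rows h (b ++ [PySem.Str.strip line])]
      have hB : List.foldl pvGroupStep [(h, b)] (line :: rest)
          = List.foldl pvGroupStep [(h, b ++ [PySem.Str.strip line])] rest := by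
        rw [List.foldl_cons]
        have : pvGroupStep [(h, b)] line = [(h, b ++ [PySem.Str.strip line])] := by
          simp only [pvGroupStep]; rw [if_neg hc]; simp [pvSetLastBody]
        rw [this]
      rw [hB]

-- before the first header: A's rows stay [], name stays "", B's groups stay []
lemma pv_closed (lines : List String) :
    ∀ (b : List String),
      pvAFlush (lines.foldl pvAStep ([], "", "", b))
        = (List.foldl pvGroupStep [] lines).flatMap pvFormatGroup := by
  induction lines with
  | nil => intro b; simp [pvAFlush]
  | cons line rest ih =>
    intro b
    by_cases hc : line ≠ "" ∧ PySem.Str.startswith line " " = false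
    · rw [List.foldl_cons]
      have hA : pvAStep ([], "", "", b) line
          = (pvAFlush (([] : List (String × String × String)), "", "", b),
            PySem.Str.strip (pvHeadNT line).1, PySem.Str.strip (pvHeadNT line).2,
            ([] : List String)) := pv_astep_header _ _ hc
      have hfl : pvAFlush (([] : List (String × String × String)), "", "", b) = [] := by
        simp [pvAFlush]
      rw [hA, hfl, pv_open rest [] line []]
      have hB : List.foldl pvGroupStep [] (line :: rest)
          = List.foldl pvGroupStep [(line, [])] rest := by
        rw [List.foldl_cons]
        have : pvGroupStep [] line = [(line, ([] : List String))] := by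
          simp only [pvGroupStep]; rw [if_pos hc]; rfl
        rw [this]
      rw [hB]
      simp
    · rw [List.foldl_cons]
      have hA : pvAStep ([], "", "", b) line = ([], "", "", b ++ [PySem.Str.strip line]) := by
        simp only [pvAStep]; rw [if_neg hc]
      have hB : List.foldl pvGroupStep [] (line :: rest) = List.foldl pvGroupStep [] rest := by
        rw [List.foldl_cons]
        have : pvGroupStep [] line = [] := by
          simp only [pvGroupStep]; rw [if_neg hc]; rfl
        rw [this]
      rw [hA, hB, ih (b ++ [PySem.Str.strip line])]

-- ===== VERDICT (by name: the statement is the Claim_ definition above) =====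
theorem parse_parameters_section_py_spec : Claim_equal_parse_parameters_section_py := by
  intro text _
  unfold Spec_parse_parameters_section_py parse_parameters_section_py
    parse_parameters_section_py_alt
  by_cases ht : text = ""
  · subst ht
    decide
  · rw [if_neg ht]
    exact pv_closed (PySem.Str.splitlines text) []
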